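-- pv_equiv track=rewrite | github.com/FGRCL/COMP479 | p1/p1/solutions.py | block_document_segmenter
-- ===== SOURCE A (Python) =====
-- def block_document_segmenter(INPUT_STRUCTURE):
--     # WRITE YOUR CODE HERE vvvvvvvvvvvvvvvv
--     for file in INPUT_STRUCTURE:
--         remainingContent = file
--         startIndex = remainingContent.find('<REUTERS')
--         stopIndex = remainingContent.find('<REUTERS', startIndex+1)
--         while startIndex != -1:
--             if(stopIndex == -1):
--                 yield remainingContent[startIndex:]
--             else:
--                 yield remainingContent[startIndex: stopIndex-1]
--             remainingContent = remainingContent[stopIndex:]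
--             startIndex = remainingContent.find('<REUTERS')
--             stopIndex = remainingContent.find('<REUTERS', startIndex+1)
-- ===== SOURCE B (Python) =====
-- def block_document_segmenter(INPUT_STRUCTURE):
--     # Index-table decomposition: collect all absolute marker positions first,
--     # then emit segments from the table in a second pass.
--     for file in INPUT_STRUCTURE:
--         positions = []
--         p = file.find('<REUTERS')
--         while p != -1:
--             positions.append(p)
--             p = file.find('<REUTERS', p + 1)
--         for i in range(len(positions) - 1):
--             yield file[positions[i]:positions[i + 1] - 1]
--         if positions:
--             yield file[positions[-1]:]
-- ===== Notes on version B (the rewrite author's own statement) =====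
-- stated objective: alternative
-- what changed: B first scans each file once to build the full table of absolute '<REUTERS' positions, then emits the segments from that table in a separate pass, instead of A's interleaved find/yield loop that repeatedly re-slices the remaining string and works with relative indices.
import Mathlib
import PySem

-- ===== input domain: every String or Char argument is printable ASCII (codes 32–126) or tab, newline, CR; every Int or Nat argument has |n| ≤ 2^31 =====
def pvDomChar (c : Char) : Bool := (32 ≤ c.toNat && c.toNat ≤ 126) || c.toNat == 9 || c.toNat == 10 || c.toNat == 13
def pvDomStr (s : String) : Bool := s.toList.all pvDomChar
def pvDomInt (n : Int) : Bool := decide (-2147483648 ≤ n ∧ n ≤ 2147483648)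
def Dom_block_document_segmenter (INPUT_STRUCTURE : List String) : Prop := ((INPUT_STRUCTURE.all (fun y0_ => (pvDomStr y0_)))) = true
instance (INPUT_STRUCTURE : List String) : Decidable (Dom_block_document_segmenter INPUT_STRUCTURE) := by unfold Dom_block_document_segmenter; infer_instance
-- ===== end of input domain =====

-- B collects the table of all absolute '<REUTERS' positions first and then emits the
-- segments from that table in a second pass, instead of A's interleaved find/yield with
-- repeated re-slicing of the remaining string (objective: alternative decomposition).

-- the literal '<REUTERS'
def pvMarker : List Char := ['<', 'R', 'E', 'U', 'T', 'E', 'R', 'S']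

-- facts about find/findFrom on pvMarker, used by the ports' termination proofs
theorem pv_marker_at_le (f : List Char) (j : Nat) (h : pvMarker <+: f.drop j) :
    j + 8 ≤ f.length := by
  have h1 := h.length_le
  simp [List.length_drop, pvMarker] at h1
  omega

theorem pv_find_facts (r : List Char) (h : PySem.Chars.find r pvMarker ≠ -1) :
    0 ≤ PySem.Chars.find r pvMarker ∧
      pvMarker <+: r.drop (PySem.Chars.find r pvMarker).toNat := by
  have h0 := PySem.Chars.neg_one_le_find r pvMarker
  have h0' : 0 ≤ PySem.Chars.find r pvMarker := by omega
  exact ⟨h0', (PySem.Chars.find_spec h0').1⟩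

theorem segA_dec (r : List Char) (hA : ¬ PySem.Chars.find r pvMarker = -1) :
    (PySem.List.slice r
        (some (PySem.Chars.findFrom r pvMarker (PySem.Chars.find r pvMarker + 1) none))
        none).length < r.length := by
  obtain ⟨h0, hm⟩ := pv_find_facts r hA
  have hlen := pv_marker_at_le r _ hm
  by_cases hB : PySem.Chars.findFrom r pvMarker (PySem.Chars.find r pvMarker + 1) none = -1
  · rw [hB, PySem.List.slice_from_neg_one, List.length_drop]
    omega
  · rw [show PySem.Chars.find r pvMarker + 1 =
        (((PySem.Chars.find r pvMarker).toNat + 1 : Nat) : Int) by omega] at hB ⊢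
    obtain ⟨hge, hm', -⟩ := PySem.Chars.findFrom_natCast_spec r pvMarker
      ((PySem.Chars.find r pvMarker).toNat + 1) (by omega) hB
    rw [show PySem.Chars.findFrom r pvMarker
          (((PySem.Chars.find r pvMarker).toNat + 1 : Nat) : Int) none =
        (((PySem.Chars.findFrom r pvMarker
          (((PySem.Chars.find r pvMarker).toNat + 1 : Nat) : Int) none).toNat : Nat) : Int) by omega]
    rw [PySem.List.slice_from_natCast, List.length_drop]
    omega

-- ===== PORT A =====
-- A's while loop over the remaining content: find the marker, find the next marker,
-- yield the (relative) slice, continue on remainingContent[stopIndex:].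
def segA (r : List Char) : List (List Char) :=
  if hA : PySem.Chars.find r pvMarker = -1 then []
  else
    (if PySem.Chars.findFrom r pvMarker (PySem.Chars.find r pvMarker + 1) none = -1 then
        PySem.List.slice r (some (PySem.Chars.find r pvMarker)) none
      else
        PySem.List.slice r (some (PySem.Chars.find r pvMarker))
          (some (PySem.Chars.findFrom r pvMarker (PySem.Chars.find r pvMarker + 1) none - 1)))
    :: segA (PySem.List.slice r
        (some (PySem.Chars.findFrom r pvMarker (PySem.Chars.find r pvMarker + 1) none)) none)
termination_by r.length
decreasing_by exact segA_dec r hA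

def block_document_segmenter (INPUT_STRUCTURE : List String) : List String :=
  INPUT_STRUCTURE.flatMap (fun file => (segA file.toList).map String.ofList)

-- ===== PORT B =====
-- invariant carried by B's position-collecting loop (totality only): the current value
-- of p is -1 or an actual marker position
def pvInv (f : List Char) (p : Int) : Prop :=
  p = -1 ∨ (0 ≤ p ∧ pvMarker <+: f.drop p.toNat)

theorem pvInv_findFrom_nat (f : List Char) (k : Nat) (hk : k ≤ f.length) :
    pvInv f (PySem.Chars.findFrom f pvMarker (k : Int) none) := by
  by_cases h : PySem.Chars.findFrom f pvMarker (k : Int) none = -1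
  · exact Or.inl h
  · obtain ⟨hge, hm, -⟩ := PySem.Chars.findFrom_natCast_spec f pvMarker k hk h
    exact Or.inr ⟨by omega, hm⟩

theorem pvInv_find (r : List Char) : pvInv r (PySem.Chars.find r pvMarker) := by
  by_cases h : PySem.Chars.find r pvMarker = -1
  · exact Or.inl h
  · exact Or.inr (pv_find_facts r h)

theorem pvInv_step (f : List Char) (p : Int) (hp : pvInv f p) (h : p ≠ -1) :
    pvInv f (PySem.Chars.findFrom f pvMarker (p + 1) none) := by
  obtain ⟨h0, hm⟩ := hp.resolve_left h
  have hlen := pv_marker_at_le f p.toNat hm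
  rw [show p + 1 = ((p.toNat + 1 : Nat) : Int) by omega]
  exact pvInv_findFrom_nat f (p.toNat + 1) (by omega)

-- B's while loop: p = file.find(m); while p != -1: positions.append(p); p = file.find(m, p+1)
def posLoop (f : List Char) (p : Int) (hp : pvInv f p) : List Int :=
  if h : p = -1 then []
  else p :: posLoop f (PySem.Chars.findFrom f pvMarker (p + 1) none) (pvInv_step f p hp h)
termination_by (if p = -1 then 0 else f.length + 1 - p.toNat)
decreasing_by
  obtain ⟨h0, hm⟩ := hp.resolve_left h
  have hlen := pv_marker_at_le f p.toNat hm
  by_cases hn : PySem.Chars.findFrom f pvMarker (p + 1) none = -1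
  · rw [hn, if_pos rfl, if_neg h]
    omega
  · rw [show p + 1 = ((p.toNat + 1 : Nat) : Int) by omega] at hn ⊢
    obtain ⟨hge, -, -⟩ := PySem.Chars.findFrom_natCast_spec f pvMarker (p.toNat + 1) (by omega) hn
    rw [if_neg hn, if_neg h]
    omega

-- B's emission pass: for i in range(len(positions)-1) yield f[p_i : p_{i+1}-1]; then f[p_last:]
def emitB (f : List Char) : List Int → List (List Char)
  | [] => []
  | [p] => [PySem.List.slice f (some p) none]
  | p :: q :: rest =>
      PySem.List.slice f (some p) (some (q - 1)) :: emitB f (q :: rest)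

def block_document_segmenter_alt (INPUT_STRUCTURE : List String) : List String :=
  INPUT_STRUCTURE.flatMap (fun file =>
    (emitB file.toList
        (posLoop file.toList (PySem.Chars.find file.toList pvMarker)
          (pvInv_find file.toList))).map String.ofList)

-- ===== PRECONDITION & SPEC =====
def Spec_block_document_segmenter (INPUT_STRUCTURE : List String) (out : List String) : Prop := out = block_document_segmenter_alt INPUT_STRUCTURE
instance (INPUT_STRUCTURE : List String) (out : List String) : Decidable (Spec_block_document_segmenter INPUT_STRUCTURE out) := by unfold Spec_block_document_segmenter; infer_instance

-- ===== CLAIM (what is proved, stated in full; the proofs are below) =====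
def Claim_equal_block_document_segmenter : Prop := ∀ (INPUT_STRUCTURE : List String), Dom_block_document_segmenter INPUT_STRUCTURE → Spec_block_document_segmenter INPUT_STRUCTURE (block_document_segmenter INPUT_STRUCTURE)

-- ===== LEMMAS AND PROOFS =====

theorem posLoop_congr (f : List Char) {p p' : Int} (h : pvInv f p) (h' : pvInv f p')
    (e : p = p') : posLoop f p h = posLoop f p' h' := by subst e; rfl

theorem posLoop_neg_one (f : List Char) (h : pvInv f (-1)) : posLoop f (-1) h = [] := by
  rw [posLoop]
  simp

theorem posLoop_pos (f : List Char) (p : Int) (hp : pvInv f p) (h : p ≠ -1) :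
    posLoop f p hp = p :: posLoop f (PySem.Chars.findFrom f pvMarker (p + 1) none)
      (pvInv_step f p hp h) := by
  rw [posLoop, dif_neg h]

theorem pv_find_small (r : List Char) (h : r.length < 8) :
    PySem.Chars.find r pvMarker = -1 := by
  rw [PySem.Chars.find_eq_neg_one_iff]
  intro hinf
  have := hinf.length_le
  simp [pvMarker] at this
  omega

theorem pv_find_prefix (r : List Char) (h : pvMarker <+: r) :
    PySem.Chars.find r pvMarker = 0 := by
  have hne : PySem.Chars.find r pvMarker ≠ -1 := by
    rw [Ne, PySem.Chars.find_eq_neg_one_iff, not_not]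
    exact h.isInfix
  obtain ⟨h0, -⟩ := pv_find_facts r hne
  have hspec := PySem.Chars.find_spec h0
  by_contra hne0
  have hpos : 0 < (PySem.Chars.find r pvMarker).toNat := by omega
  exact hspec.2 0 hpos (by simpa using h)

-- the key invariant: A's loop on the suffix f.drop k equals B's table-driven emission
-- from the first marker position at or after k
theorem pv_key (f : List Char) (n : Nat) :
    ∀ (k : Nat), f.length - k < n → (hk : k ≤ f.length) →
      segA (f.drop k) =
        emitB f (posLoop f (PySem.Chars.findFrom f pvMarker (k : Int) none)
          (pvInv_findFrom_nat f k hk)) := by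
  induction n with
  | zero => intro k h hk; omega
  | succ n ih =>
    intro k hmeas hk
    have hFk := PySem.Chars.findFrom_natCast f pvMarker k hk
    by_cases h1 : PySem.Chars.find (f.drop k) pvMarker = -1
    · have e : PySem.Chars.findFrom f pvMarker (k : Int) none = -1 := by
        rw [hFk, if_pos h1]
      rw [posLoop_congr f (pvInv_findFrom_nat f k hk) (Or.inl rfl) e, posLoop_neg_one]
      rw [segA, dif_pos h1]
      simp [emitB]
    · obtain ⟨hst0, hstm⟩ := pv_find_facts (f.drop k) h1
      set st := PySem.Chars.find (f.drop k) pvMarker with hstdef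
      set stn : Nat := st.toNat with hstn
      -- a := absolute position of the first marker at or after k
      set a : Nat := k + stn with hadef
      have hstm' : pvMarker <+: f.drop a := by
        rw [hadef, ← List.drop_drop]; exact hstm
      have hlen := pv_marker_at_le f a hstm'
      have e : PySem.Chars.findFrom f pvMarker (k : Int) none = ((a : Nat) : Int) := by
        rw [hFk, if_neg h1]; omega
      have hInvA : pvInv f ((a : Nat) : Int) := e ▸ pvInv_findFrom_nat f k hk
      rw [posLoop_congr f (pvInv_findFrom_nat f k hk) hInvA e,
        posLoop_pos f _ hInvA (by omega)]
      -- both next-marker searches see the same tail f.drop (a+1)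
      set c := PySem.Chars.find (f.drop (a + 1)) pvMarker with hcdef
      have htail : (f.drop k).drop (stn + 1) = f.drop (a + 1) := by
        rw [List.drop_drop, show k + (stn + 1) = a + 1 by omega]
      have hstoplen : stn + 1 ≤ (f.drop k).length := by
        have := pv_marker_at_le (f.drop k) stn hstm
        omega
      have hstop : PySem.Chars.findFrom (f.drop k) pvMarker (st + 1) none =
          if c = -1 then -1 else ((stn + 1 : Nat) : Int) + c := by
        rw [show st + 1 = ((stn + 1 : Nat) : Int) by omega,
          PySem.Chars.findFrom_natCast (f.drop k) pvMarker (stn + 1) hstoplen,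
          htail, ← hcdef]
      have hN : PySem.Chars.findFrom f pvMarker (((a : Nat) : Int) + 1) none =
          if c = -1 then -1 else ((a + 1 : Nat) : Int) + c := by
        rw [show ((a : Nat) : Int) + 1 = ((a + 1 : Nat) : Int) by push_cast; ring,
          PySem.Chars.findFrom_natCast f pvMarker (a + 1) (by omega), ← hcdef]
      by_cases hc : c = -1
      · -- no further marker: last segment f[a:], A additionally recurses on the 1-char tail
        rw [if_pos hc] at hN
        have hstop' : PySem.Chars.findFrom (f.drop k) pvMarker (st + 1) none = -1 := by
          rw [hstop, if_pos hc]
        rw [segA, dif_neg h1, ← hstdef, hstop', if_pos (rfl : (-1 : Int) = -1)]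
        have hseg0 : segA (PySem.List.slice (f.drop k) (some (-1)) none) = [] := by
          rw [segA, dif_pos]
          apply pv_find_small
          rw [PySem.List.slice_from_neg_one, List.length_drop]
          omega
        rw [hseg0, posLoop_congr f (pvInv_step f _ hInvA (by omega)) (Or.inl rfl) hN,
          posLoop_neg_one]
        simp only [emitB]
        rw [show st = ((stn : Nat) : Int) by omega, PySem.List.slice_from_natCast,
          List.drop_drop, PySem.List.slice_from_natCast,
          show k + stn = a by omega]
      · -- a further marker at absolute position b := a + 1 + c.toNat
        have hc0 : 0 ≤ c := by
          have := PySem.Chars.neg_one_le_find (f.drop (a + 1)) pvMarker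
          rw [← hcdef] at this; omega
        rw [if_neg hc] at hN
        have hstop' : PySem.Chars.findFrom (f.drop k) pvMarker (st + 1) none =
            ((stn + 1 : Nat) : Int) + c := by rw [hstop, if_neg hc]
        rw [segA, dif_neg h1, ← hstdef, hstop']
        set cn : Nat := c.toNat with hcn
        set b : Nat := a + 1 + cn with hbdef
        have hbm : pvMarker <+: f.drop b := by
          have := (PySem.Chars.find_spec (s := f.drop (a + 1)) (sub := pvMarker)
            (by rw [← hcdef]; exact hc0)).1
          rw [← hcdef, List.drop_drop] at this
          exact this
        have hblen := pv_marker_at_le f b hbm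
        have hNb : PySem.Chars.findFrom f pvMarker (((a : Nat) : Int) + 1) none =
            ((b : Nat) : Int) := by rw [hN]; omega
        have hInvB : pvInv f ((b : Nat) : Int) := hNb ▸ pvInv_step f _ hInvA (by omega)
        rw [posLoop_congr f (pvInv_step f _ hInvA (by omega)) hInvB hNb,
          posLoop_pos f _ hInvB (by omega)]
        rw [if_neg (by omega : ¬ ((stn + 1 : Nat) : Int) + c = -1)]
        -- heads are the same slice
        have hhead : PySem.List.slice (f.drop k) (some st)
            (some (((stn + 1 : Nat) : Int) + c - 1)) =
            PySem.List.slice f (some ((a : Nat) : Int)) (some (((b : Nat) : Int) - 1)) := by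
          rw [show (((stn + 1 : Nat) : Int) + c - 1) = ((stn + cn : Nat) : Int) by
              push_cast; omega,
            show ((b : Nat) : Int) - 1 = ((a + cn : Nat) : Int) by push_cast; omega,
            show st = ((stn : Nat) : Int) by omega,
            PySem.List.slice_natCast, PySem.List.slice_natCast, List.drop_drop,
            show k + stn = a by omega]
          congr 1
          omega
        -- tails: A recurses on f.drop b, which is B's emission from position b
        have htail2 : PySem.List.slice (f.drop k)
            (some (((stn + 1 : Nat) : Int) + c)) none = f.drop b := by
          rw [show ((stn + 1 : Nat) : Int) + c = ((stn + 1 + cn : Nat) : Int) by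
              push_cast; omega,
            PySem.List.slice_from_natCast, List.drop_drop]
          congr 1
          omega
        have hFb : PySem.Chars.findFrom f pvMarker ((b : Nat) : Int) none = ((b : Nat) : Int) := by
          rw [PySem.Chars.findFrom_natCast f pvMarker b (by omega), pv_find_prefix _ hbm]
          simp
        have ihb := ih b (by omega) (by omega)
        rw [posLoop_congr f (pvInv_findFrom_nat f b (by omega)) hInvB hFb,
          posLoop_pos f _ hInvB (by omega)] at ihb
        rw [htail2, hhead, ihb]
        rfl
theorem block_document_segmenter_spec : Claim_equal_block_document_segmenter := by
  intro l hdom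
  unfold Spec_block_document_segmenter block_document_segmenter block_document_segmenter_alt
  have hfile : ∀ g : List Char,
      segA g = emitB g (posLoop g (PySem.Chars.find g pvMarker) (pvInv_find g)) := by
    intro g
    have e : PySem.Chars.findFrom g pvMarker ((0 : Nat) : Int) none =
        PySem.Chars.find g pvMarker := by
      rw [show ((0 : Nat) : Int) = 0 by rfl, PySem.Chars.findFrom_zero]
    have h := pv_key g (g.length + 1) 0 (by omega) (Nat.zero_le _)
    rw [List.drop_zero, posLoop_congr g (pvInv_findFrom_nat g 0 (Nat.zero_le _))
      (pvInv_find g) e] at h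
    exact h
  simp only [hfile]
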